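-- pv_equiv track=rewrite | github.com/tEoGZZH/dart4wsd | util.py | get_eval_pair
-- ===== SOURCE A (Python) =====
-- def get_eval_pair(sense_index):
--         prefix_groups = {}
--         for sense, index in sense_index.items():
--             prefix = sense.split('.')[0]
--             if prefix not in prefix_groups:
--                 prefix_groups[prefix] = []
--             prefix_groups[prefix].append(index)
--
--         lemma_pair = {}
--         lemmas = list(prefix_groups.keys())
--         for idx, lemma in enumerate(lemmas):
--             lemma_pair[idx] = prefix_groups[lemma]
--
--         eval_pair = {}
--         for sense, index in sense_index.items():
--             prefix = sense.split('.')[0]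
--             eval_pair[index] = prefix_groups[prefix]
--
--         return lemmas, lemma_pair, eval_pair
-- ===== SOURCE B (Python) =====
-- def get_eval_pair(sense_index):
--     # Staged declarative decomposition: project (prefix, index) pairs once, dedup
--     # the prefixes, then build each group by a filtering scan per lemma instead of
--     # accumulating a dict of lists; both dicts are comprehensions over that.
--     pairs = [(sense.split('.')[0], index) for sense, index in sense_index.items()]
--     lemmas = []
--     for prefix, _ in pairs:
--         if prefix not in lemmas:
--             lemmas.append(prefix)
--     groups = {lem: [i for p, i in pairs if p == lem] for lem in lemmas}
--     lemma_pair = {pos: groups[lem] for pos, lem in enumerate(lemmas)}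
--     eval_pair = {i: groups[p] for p, i in pairs}
--     return lemmas, lemma_pair, eval_pair
-- ===== Notes on version B (the rewrite author's own statement) =====
-- stated objective: alternative
-- what changed: A accumulates a dict of lists in one pass and then rescans sense_index rebuilding prefixes to fill eval_pair; B never accumulates groups incrementally: it projects (prefix, index) pairs once, dedups the prefixes into lemmas, builds each group by a filtering scan per lemma, and derives lemma_pair and eval_pair as comprehensions over those pairs.
import Mathlib
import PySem

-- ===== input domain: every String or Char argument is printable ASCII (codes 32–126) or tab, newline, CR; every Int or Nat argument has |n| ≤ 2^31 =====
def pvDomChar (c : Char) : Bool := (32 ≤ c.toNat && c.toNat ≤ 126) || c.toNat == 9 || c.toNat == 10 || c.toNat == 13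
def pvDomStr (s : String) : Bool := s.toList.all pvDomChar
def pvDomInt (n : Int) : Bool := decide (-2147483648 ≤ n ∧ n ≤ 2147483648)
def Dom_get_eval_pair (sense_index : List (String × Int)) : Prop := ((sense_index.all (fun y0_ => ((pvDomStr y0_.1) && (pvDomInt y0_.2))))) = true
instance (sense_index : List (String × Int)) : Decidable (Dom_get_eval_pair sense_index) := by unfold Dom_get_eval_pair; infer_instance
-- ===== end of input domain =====

-- B replaces A's incremental dict-of-lists accumulation (plus a second rescan of sense_index)
-- by a staged decomposition: project (prefix, index) pairs once, dedup the prefixes, build each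
-- group by a filtering scan per lemma; same return value, different structure (alternative).

-- ===== PORT A =====
-- sense.split('.')[0]: '.' is a nonempty separator, so split? is some and the result is nonempty
def pvPrefix (s : String) : String :=
  PySem.List.pyGetD ((PySem.Str.split? s ".").getD []) 0 ""

-- A's grouping loop (if prefix not in: new empty list; then append)
def pvGroupsA (si : List (String × Int)) : PySem.Dict String (List Int) := si.foldl
  (fun d q =>
    let p := pvPrefix q.1
    let d := if d.contains p then d else d.insert p []
    d.modify p [] (fun l => l ++ [q.2]))
  PySem.Dict.empty

def get_eval_pair (sense_index : List (String × Int)) : List String × (List (Int × List Int)) × (List (Int × List Int)) :=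
  ((pvGroupsA sense_index).keys,
   -- for idx, lemma in enumerate(lemmas): lemma_pair[idx] = prefix_groups[lemma]
   ((PySem.List.enumerate (pvGroupsA sense_index).keys 0).foldl
      (fun lp e => lp.insert e.1 ((pvGroupsA sense_index).getD e.2 [])) PySem.Dict.empty).items,
   -- second scan of sense_index, re-splitting each sense
   (sense_index.foldl
      (fun ep q => ep.insert q.2 ((pvGroupsA sense_index).getD (pvPrefix q.1) [])) PySem.Dict.empty).items)

-- ===== PORT B =====
-- pairs = [(sense.split('.')[0], index) for sense, index in sense_index.items()]
def pvPairs (si : List (String × Int)) : List (String × Int) := si.map (fun q => (pvPrefix q.1, q.2))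
-- the dedup loop: if prefix not in lemmas: lemmas.append(prefix)
def pvLemB (si : List (String × Int)) : List String :=
  (pvPairs si).foldl (fun L p => if L.contains p.1 then L else L ++ [p.1]) []
-- groups = {lem: [i for p, i in pairs if p == lem] for lem in lemmas}
def pvGroupsB (si : List (String × Int)) : PySem.Dict String (List Int) := (pvLemB si).foldl
  (fun d lem => d.insert lem (((pvPairs si).filter (fun p => p.1 == lem)).map (fun p => p.2)))
  PySem.Dict.empty

def get_eval_pair_alt (sense_index : List (String × Int)) : List String × (List (Int × List Int)) × (List (Int × List Int)) :=
  (pvLemB sense_index,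
   -- lemma_pair = {pos: groups[lem] for pos, lem in enumerate(lemmas)}
   ((PySem.List.enumerate (pvLemB sense_index) 0).foldl
      (fun d e => d.insert e.1 ((pvGroupsB sense_index).getD e.2 [])) PySem.Dict.empty).items,
   -- eval_pair = {i: groups[p] for p, i in pairs}
   ((pvPairs sense_index).foldl
      (fun d p => d.insert p.2 ((pvGroupsB sense_index).getD p.1 [])) PySem.Dict.empty).items)

-- ===== PRECONDITION & SPEC =====
def Spec_get_eval_pair (sense_index : List (String × Int)) (out : List String × (List (Int × List Int)) × (List (Int × List Int))) : Prop := out = get_eval_pair_alt sense_index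
instance (sense_index : List (String × Int)) (out : List String × (List (Int × List Int)) × (List (Int × List Int))) : Decidable (Spec_get_eval_pair sense_index out) := by unfold Spec_get_eval_pair; infer_instance

-- ===== CLAIM =====
def Claim_equal_get_eval_pair : Prop := ∀ (sense_index : List (String × Int)), Dom_get_eval_pair sense_index → Spec_get_eval_pair sense_index (get_eval_pair sense_index)

-- ===== LEMMAS AND PROOFS =====

-- the distinct prefixes of the senses, in first-occurrence order
def pvL (si : List (String × Int)) : List String := PySem.Set.ofList ((pvPairs si).map Prod.fst)
-- the group of prefix c
def pvGrp (si : List (String × Int)) (c : String) : List Int :=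
  ((pvPairs si).filter (fun p => p.1 == c)).map (fun p => p.2)

-- A's loop body (if/insert/append) is Dict.modify
theorem pvStepA_eq (d : PySem.Dict String (List Int)) (p : String) (i : Int) :
    (if d.contains p then d else d.insert p []).modify p [] (fun l => l ++ [i])
      = d.modify p [] (fun l => l ++ [i]) := by
  by_cases h : d.contains p = true
  · simp [h]
  · have hnone : d.get? p = none := (PySem.Dict.get?_eq_none_iff_contains d p).mpr (by simpa using h)
    simp [h, PySem.Dict.modify, PySem.Dict.getD, hnone, PySem.Dict.insert_insert_self]

-- A's prefix_groups as a fold of modifies over the pairs list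
theorem pvGroupsA_eq (si : List (String × Int)) :
    pvGroupsA si = (pvPairs si).foldl (fun d p => d.modify p.1 [] (fun l => l ++ [p.2])) PySem.Dict.empty := by
  rw [pvGroupsA, pvPairs, List.foldl_map]
  exact PySem.List.foldl_congr_mem _ _ _ _ (fun d q _ => pvStepA_eq d (pvPrefix q.1) q.2)

theorem pvGroupsA_getD (si : List (String × Int)) (c : String) :
    (pvGroupsA si).getD c [] = pvGrp si c := by
  rw [pvGroupsA_eq, PySem.Dict.getD_foldl_modify_append, pvGrp]
  simp [PySem.Dict.getD_empty]

theorem pvGroupsA_keys (si : List (String × Int)) : (pvGroupsA si).keys = pvL si := by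
  rw [pvGroupsA_eq]
  have h := PySem.Dict.keys_foldl_modify_key (pvPairs si) (fun p => p.1) []
    (fun d p => (fun l => l ++ [p.2])) PySem.Dict.empty
  simpa [pvL, PySem.Set.update, PySem.Set.ofList, PySem.Dict.keys_empty, PySem.Set.empty] using h

-- B's dedup loop computes pvL
theorem pvLemB_eq (si : List (String × Int)) : pvLemB si = pvL si := by
  rw [pvLemB, pvL, PySem.Set.ofList, List.foldl_map]
  rfl

-- B's groups dict lists exactly the groups of the distinct prefixes
theorem pvGroupsB_items (si : List (String × Int)) :
    (pvGroupsB si).items = (pvL si).map (fun lem => (lem, pvGrp si lem)) := by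
  rw [pvGroupsB, pvLemB_eq]
  have h := PySem.Dict.items_foldl_insert_fresh (pvL si) (fun lem => lem)
    (fun lem => ((pvPairs si).filter (fun p => p.1 == lem)).map (fun p => p.2))
    PySem.Dict.empty
    (fun a _ => by simp [PySem.Dict.contains, PySem.Dict.empty])
    (by rw [show (fun (lem : String) => lem) = id from rfl, List.map_id, pvL]
        exact PySem.Set.nodup_ofList _)
  simpa [pvGrp] using h

theorem pvGroupsB_nodup_keys (si : List (String × Int)) : (pvGroupsB si).keys.Nodup := by
  rw [pvGroupsB]
  exact PySem.Dict.nodup_keys_foldl_insert _ _ _ (by simp [PySem.Dict.keys_empty])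

theorem pvGroupsB_getD (si : List (String × Int)) (c : String) (hc : c ∈ pvL si) :
    (pvGroupsB si).getD c [] = pvGrp si c := by
  have hmem : (c, pvGrp si c) ∈ (pvGroupsB si).items := by
    rw [pvGroupsB_items]; exact List.mem_map.mpr ⟨c, hc, rfl⟩
  exact PySem.Dict.getD_of_mem_items _ hmem (pvGroupsB_nodup_keys si) []

theorem pvMem_enumerate_snd {α : Type} (L : List α) (n : Int) (e : Int × α)
    (h : e ∈ PySem.List.enumerate L n) : e.2 ∈ L := by
  induction L generalizing n with
  | nil => simp [PySem.List.enumerate_nil] at h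
  | cons x L ih =>
    rw [PySem.List.enumerate_cons, List.mem_cons] at h
    rcases h with rfl | h
    · exact List.mem_cons_self
    · exact List.mem_cons_of_mem _ (ih _ h)

-- ===== VERDICT (by name: the statement is the Claim_ definition above) =====
theorem get_eval_pair_spec : Claim_equal_get_eval_pair := by
  intro si _
  unfold Spec_get_eval_pair get_eval_pair get_eval_pair_alt
  rw [pvLemB_eq, pvGroupsA_keys]
  simp only [Prod.mk.injEq]
  refine ⟨trivial, ?_, ?_⟩
  · congr 1
    refine PySem.List.foldl_congr_mem _ _ _ _ (fun d e he => ?_)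
    rw [pvGroupsA_getD, pvGroupsB_getD si e.2 (pvMem_enumerate_snd _ _ _ he)]
  · congr 1
    rw [pvPairs, List.foldl_map]
    refine PySem.List.foldl_congr_mem _ _ _ _ (fun d q hq => ?_)
    have hm : pvPrefix q.1 ∈ pvL si := by
      rw [pvL, PySem.Set.mem_ofList]
      exact List.mem_map.mpr ⟨(pvPrefix q.1, q.2), List.mem_map.mpr ⟨q, hq, rfl⟩, rfl⟩
    rw [pvGroupsA_getD, pvGroupsB_getD si (pvPrefix q.1) hm]
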